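-- pv_equiv track=rewrite | github.com/suhyehye/Coding-Test | 프로그래머스/level2/프린터.py | solution
-- ===== SOURCE A (Python) =====
-- from collections import deque
--
-- def solution(priorities, location):
--     priorities = deque([[idx, x] for idx, x in enumerate(priorities)])
--     waiting = []
--
--     while len(priorities) >= 1:
--         i = priorities.popleft()
--         if len(priorities) == 0:
--             waiting.append(i)
--         elif i[1] < max([x[1] for x in priorities]):
--             priorities.append(i)
--         else:
--             waiting.append(i[0])
--             if i[0] == location:
--                 break
--     return len(waiting)
-- ===== SOURCE B (Python) =====
-- def solution(priorities, location):
--     # Jump straight to the first highest-priority document each round instead of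
--     # rotating the queue one element at a time (and recomputing the max per rotation).
--     queue = list(enumerate(priorities))
--     printed = 0
--     while queue:
--         m = max(p for _, p in queue)
--         k = next(j for j, (_, p) in enumerate(queue) if p == m)
--         idx = queue[k][0]
--         queue = queue[k + 1:] + queue[:k]
--         printed += 1
--         if idx == location:
--             break
--     return printed
-- ===== Notes on version B (the rewrite author's own statement) =====
-- stated objective: faster
-- what changed: B jumps straight to the first highest-priority document of the queue each round (one max scan + one argmax + one slice per printed document) instead of A's element-by-element deque rotation that recomputes max() on every single rotation step.
import Mathlib
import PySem

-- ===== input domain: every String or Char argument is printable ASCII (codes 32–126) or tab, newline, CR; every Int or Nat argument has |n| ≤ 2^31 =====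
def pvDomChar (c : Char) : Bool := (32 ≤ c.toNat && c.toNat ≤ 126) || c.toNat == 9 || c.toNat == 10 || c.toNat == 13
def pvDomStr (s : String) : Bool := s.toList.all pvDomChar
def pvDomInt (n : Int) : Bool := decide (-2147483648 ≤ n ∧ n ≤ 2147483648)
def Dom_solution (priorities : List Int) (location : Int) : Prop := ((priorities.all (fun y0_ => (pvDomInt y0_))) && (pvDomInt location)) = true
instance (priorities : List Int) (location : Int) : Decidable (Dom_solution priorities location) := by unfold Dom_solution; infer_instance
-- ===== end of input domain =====

-- B changes the algorithm: one argmax jump + slice per printed document instead of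
-- A's element-by-element queue rotation with a fresh max() scan on every rotation.

-- Python's max(list of ints) — used by both ports (A: max([x[1] for x in priorities]); B: max(p for _, p in queue)).
def pyMaxInt (xs : List Int) : Int := (PySem.List.max? xs (fun y => y)).getD 0

-- facts about pyMaxInt needed by the ports' termination arguments (cited in decreasing_by)
theorem pyMaxInt_cons (v : Int) (t : List Int) : pyMaxInt (v :: t) = t.foldl max v := by
  simp [pyMaxInt, PySem.List.max?_id_cons]

theorem le_pyMaxInt {l : List Int} {y : Int} (hy : y ∈ l) : y ≤ pyMaxInt l := by
  cases l with
  | nil => simp at hy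
  | cons v t =>
    rw [pyMaxInt_cons]
    rcases List.mem_cons.1 hy with h | h
    · exact h ▸ (PySem.List.le_foldl_max t v).1
    · exact (PySem.List.le_foldl_max t v).2 y h

theorem pyMaxInt_mem {l : List Int} (hl : l ≠ []) : pyMaxInt l ∈ l := by
  cases l with
  | nil => exact absurd rfl hl
  | cons v t =>
    rw [pyMaxInt_cons]
    rcases PySem.List.foldl_max_mem t v with h | h
    · rw [h]; exact List.mem_cons_self
    · exact List.mem_cons_of_mem v h

theorem pyMaxInt_cons_of_lt {a : Int} {l : List Int} (hl : l ≠ []) (h : a < pyMaxInt l) :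
    pyMaxInt (a :: l) = pyMaxInt l := by
  apply le_antisymm
  · rcases List.mem_cons.1 (pyMaxInt_mem (l := a :: l) (by simp)) with hm | hm
    · exfalso
      have : pyMaxInt l ≤ pyMaxInt (a :: l) :=
        le_pyMaxInt (List.mem_cons_of_mem a (pyMaxInt_mem hl))
      omega
    · exact le_pyMaxInt hm
  · exact le_pyMaxInt (List.mem_cons_of_mem a (pyMaxInt_mem hl))

theorem pyMaxInt_append_of_lt {l : List Int} {a : Int} (hl : l ≠ []) (h : a < pyMaxInt l) :
    pyMaxInt (l ++ [a]) = pyMaxInt l := by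
  apply le_antisymm
  · rcases List.mem_append.1 (pyMaxInt_mem (l := l ++ [a]) (by simp [hl])) with hm | hm
    · exact le_pyMaxInt hm
    · exfalso
      have : pyMaxInt l ≤ pyMaxInt (l ++ [a]) := le_pyMaxInt (List.mem_append_left _ (pyMaxInt_mem hl))
      simp at hm
      omega
  · exact le_pyMaxInt (List.mem_append_left _ (pyMaxInt_mem hl))

-- the first index holding the maximum exists (cited in the ports' decreasing_by)
theorem findIdx_pyMax_lt (l : List (Int × Int)) (hl : l ≠ []) :
    l.findIdx (fun x => x.2 == pyMaxInt (l.map (fun y => y.2))) < l.length := by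
  apply List.findIdx_lt_length_of_exists
  have hm : pyMaxInt (l.map (fun y => y.2)) ∈ l.map (fun y => y.2) :=
    pyMaxInt_mem (by simpa using hl)
  obtain ⟨x, hx, hx2⟩ := List.mem_map.1 hm
  exact ⟨x, hx, by simp [hx2]⟩

-- A rotates: moving a non-maximal head to the back keeps the max and moves the
-- first-maximum index one to the left (cited in solutionLoop's decreasing_by).
theorem rot_findIdx (i : Int × Int) (rest : List (Int × Int)) (hrest : rest ≠ [])
    (hlt : i.2 < pyMaxInt (rest.map (fun y => y.2))) :
    (rest ++ [i]).findIdx (fun x => x.2 == pyMaxInt ((rest ++ [i]).map (fun y => y.2))) + 1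
      = (i :: rest).findIdx (fun x => x.2 == pyMaxInt ((i :: rest).map (fun y => y.2)))
    ∧ (rest ++ [i]).findIdx (fun x => x.2 == pyMaxInt ((rest ++ [i]).map (fun y => y.2))) < rest.length := by
  have hmapne : rest.map (fun y : Int × Int => y.2) ≠ [] := by simpa using hrest
  have hM1 : pyMaxInt ((i :: rest).map (fun y => y.2)) = pyMaxInt (rest.map (fun y => y.2)) := by
    rw [List.map_cons]; exact pyMaxInt_cons_of_lt hmapne hlt
  have hM2 : pyMaxInt ((rest ++ [i]).map (fun y => y.2)) = pyMaxInt (rest.map (fun y => y.2)) := by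
    rw [List.map_append]; exact pyMaxInt_append_of_lt hmapne hlt
  have hj : rest.findIdx (fun x => x.2 == pyMaxInt (rest.map (fun y => y.2))) < rest.length :=
    findIdx_pyMax_lt rest hrest
  constructor
  · rw [hM1, hM2, List.findIdx_cons, List.findIdx_append, if_pos hj]
    have : (i.2 == pyMaxInt (rest.map (fun y => y.2))) = false := by
      simp; omega
    rw [this]; simp
  · rw [hM2, List.findIdx_append, if_pos hj]; exact hj

-- ===== PORT A =====
-- waiting holds either a whole [idx, x] pair (last-element branch) or a bare index, as in Python
def solutionLoop (location : Int) (q : List (Int × Int)) (waiting : List ((Int × Int) ⊕ Int)) : Int :=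
  match q with
  | [] => PySem.List.len waiting
  | i :: rest =>
    if hr : rest = [] then PySem.List.len (waiting ++ [Sum.inl i])
    else if hm : i.2 < pyMaxInt (rest.map (fun y => y.2)) then
      solutionLoop location (rest ++ [i]) waiting
    else
      if i.1 = location then PySem.List.len (waiting ++ [Sum.inr i.1])
      else solutionLoop location rest (waiting ++ [Sum.inr i.1])
termination_by 2 ^ q.length + q.findIdx (fun x => x.2 == pyMaxInt (q.map (fun y => y.2)))
decreasing_by
  · obtain ⟨heq, -⟩ := rot_findIdx i rest hr hm
    rw [show (rest ++ [i]).length = (i :: rest).length from by simp]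
    omega
  · have h1 : rest.findIdx (fun x => x.2 == pyMaxInt (rest.map (fun y => y.2))) ≤ rest.length :=
      List.findIdx_le_length
    have h2 : rest.length < 2 ^ rest.length := Nat.lt_two_pow_self
    have h3 : 2 ^ (i :: rest).length = 2 ^ rest.length * 2 := by
      rw [List.length_cons, pow_succ]
    omega

def solution (priorities : List Int) (location : Int) : Int :=
  solutionLoop location (PySem.List.enumerate priorities 0) []

-- ===== PORT B =====
def altLoop (location : Int) (queue : List (Int × Int)) (printed : Int) : Int :=
  match queue with
  | [] => printed
  | a :: t =>
    let m := pyMaxInt ((a :: t).map (fun y => y.2))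
    let k := (a :: t).findIdx (fun x => x.2 == m)
    let idx := (PySem.List.pyGetD (a :: t) (k : Int) (0, 0)).1
    if idx = location then printed + 1
    else altLoop location ((a :: t).drop (k + 1) ++ (a :: t).take k) (printed + 1)
termination_by queue.length
decreasing_by
  have hk : (a :: t).findIdx (fun x => x.2 == pyMaxInt ((a :: t).map (fun y => y.2))) < (a :: t).length :=
    findIdx_pyMax_lt (a :: t) (by simp)
  simp only [List.length_append, List.length_drop, List.length_take, List.length_cons] at *
  omega

def solution_alt (priorities : List Int) (location : Int) : Int :=
  altLoop location (PySem.List.enumerate priorities 0) 0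

-- ===== PRECONDITION & SPEC =====
def Spec_solution (priorities : List Int) (location : Int) (out : Int) : Prop := out = solution_alt priorities location
instance (priorities : List Int) (location : Int) (out : Int) : Decidable (Spec_solution priorities location out) := by unfold Spec_solution; infer_instance

-- ===== CLAIM (what is proved, stated in full; the proofs are below) =====
def Claim_equal_solution : Prop := ∀ (priorities : List Int) (location : Int), Dom_solution priorities location → Spec_solution priorities location (solution priorities location)

-- ===== LEMMAS AND PROOFS =====

-- a head the maximum does not equal can be dropped from the max
theorem pyMaxInt_cons_ne {a : Int} {l : List Int} (h : pyMaxInt (a :: l) ≠ a) :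
    pyMaxInt (a :: l) = pyMaxInt l := by
  have hl : l ≠ [] := by
    rintro rfl
    simp [pyMaxInt_cons] at h
  apply le_antisymm
  · rcases List.mem_cons.1 (pyMaxInt_mem (l := a :: l) (by simp)) with h1 | h1
    · exact absurd h1 h
    · exact le_pyMaxInt h1
  · exact le_pyMaxInt (List.mem_cons_of_mem a (pyMaxInt_mem hl))

-- A's rotation phase: rotating up to the first maximum leaves the count unchanged
theorem loopA_rot (location : Int) : ∀ (k : Nat) (q : List (Int × Int)) (w : List ((Int × Int) ⊕ Int)),
    q ≠ [] → q.findIdx (fun x => x.2 == pyMaxInt (q.map (fun y => y.2))) = k →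
    solutionLoop location q w = solutionLoop location (q.drop k ++ q.take k) w := by
  intro k
  induction k with
  | zero => intro q w _ _; simp
  | succ k ih =>
    intro q w hq hfind
    cases q with
    | nil => exact absurd rfl hq
    | cons i rest =>
      rw [List.findIdx_cons] at hfind
      cases hb : (i.2 == pyMaxInt ((i :: rest).map (fun y => y.2))) with
      | true => rw [hb] at hfind; simp at hfind
      | false =>
      rw [hb] at hfind
      simp only [cond_false] at hfind
      have hne : i.2 ≠ pyMaxInt ((i :: rest).map (fun y => y.2)) := by
        simpa using hb
      have hrest : rest ≠ [] := by
        rintro rfl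
        simp [pyMaxInt_cons] at hne
      have hMeq : pyMaxInt ((i :: rest).map (fun y => y.2)) = pyMaxInt (rest.map (fun y => y.2)) := by
        rw [List.map_cons]
        exact pyMaxInt_cons_ne (by rw [← List.map_cons]; exact fun hc => hne hc.symm)
      have hlt : i.2 < pyMaxInt (rest.map (fun y => y.2)) := by
        have hle : i.2 ≤ pyMaxInt ((i :: rest).map (fun y => y.2)) :=
          le_pyMaxInt (by simp)
        rw [hMeq] at hle hne
        exact lt_of_le_of_ne hle hne
      obtain ⟨heq, hbound⟩ := rot_findIdx i rest hrest hlt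
      have hstep : solutionLoop location (i :: rest) w = solutionLoop location (rest ++ [i]) w := by
        rw [solutionLoop, dif_neg hrest, dif_pos hlt]
      have hkeq : (rest ++ [i]).findIdx (fun x => x.2 == pyMaxInt ((rest ++ [i]).map (fun y => y.2))) = k := by
        rw [List.findIdx_cons, hb] at heq
        simp only [cond_false] at heq
        omega
      have hk : k < rest.length := by omega
      rw [hstep, ih (rest ++ [i]) w (by simp) hkeq]
      congr 1
      rw [List.drop_append_of_le_length (le_of_lt hk), List.take_append_of_le_length (le_of_lt hk),
        List.drop_succ_cons, List.take_succ_cons]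
      simp

-- main invariant: A's loop = B's loop with printed = len waiting
theorem loop_eq (location : Int) : ∀ (n : Nat) (q : List (Int × Int)) (w : List ((Int × Int) ⊕ Int)),
    q.length ≤ n → solutionLoop location q w = altLoop location q (PySem.List.len w) := by
  intro n
  induction n with
  | zero =>
    intro q w hq
    have hq0 : q = [] := List.eq_nil_of_length_eq_zero (Nat.le_zero.1 hq)
    subst hq0
    simp [solutionLoop, altLoop]
  | succ n ih =>
    intro q w hq
    cases q with
    | nil => simp [solutionLoop, altLoop]
    | cons a t =>
      have hne : (a :: t) ≠ ([] : List (Int × Int)) := by simp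
      -- one step of B on the right
      rw [altLoop]
      simp only [PySem.List.pyGetD_natCast]
      -- rotate A's queue up to the first maximum on the left
      rw [loopA_rot location ((a :: t).findIdx (fun x => x.2 == pyMaxInt ((a :: t).map (fun y => y.2)))) (a :: t) w hne rfl]
      set K := (a :: t).findIdx (fun x => x.2 == pyMaxInt ((a :: t).map (fun y => y.2))) with hK
      have hklt : K < (a :: t).length := findIdx_pyMax_lt (a :: t) hne
      obtain ⟨i, hdrop, hi2, hgetD⟩ :
          ∃ i, (a :: t).drop K = i :: (a :: t).drop (K + 1)
            ∧ i.2 = pyMaxInt ((a :: t).map (fun y => y.2))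
            ∧ (a :: t).getD K (0, 0) = i := by
        refine ⟨(a :: t)[K]'hklt, List.drop_eq_getElem_cons hklt, ?_, List.getD_eq_getElem _ _ hklt⟩
        have hp := List.findIdx_getElem (p := fun x => x.2 == pyMaxInt ((a :: t).map (fun y => y.2)))
          (xs := a :: t) (w := hklt)
        simpa using hp
      rw [hdrop, List.cons_append, hgetD]
      by_cases hend : (a :: t).drop (K + 1) ++ (a :: t).take K = []
      · rw [solutionLoop, dif_pos hend, hend]
        split_ifs <;> simp [altLoop, PySem.List.len_eq]
      · have hmax : ¬ (i.2 < pyMaxInt (((a :: t).drop (K + 1) ++ (a :: t).take K).map (fun y => y.2))) := by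
          rw [not_lt]
          have hmem := pyMaxInt_mem (l := ((a :: t).drop (K + 1) ++ (a :: t).take K).map (fun y => y.2))
            (by simpa using hend)
          obtain ⟨x, hx, hx2⟩ := List.mem_map.1 hmem
          have hxq : x ∈ a :: t := by
            rcases List.mem_append.1 hx with h | h
            · exact List.mem_of_mem_drop h
            · exact List.mem_of_mem_take h
          rw [hi2, ← hx2]
          exact le_pyMaxInt (List.mem_map_of_mem hxq)
        rw [solutionLoop, dif_neg hend, dif_neg hmax]
        by_cases hloc : i.1 = location
        · rw [if_pos hloc, if_pos hloc]
          simp [PySem.List.len_eq]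
        · rw [if_neg hloc, if_neg hloc]
          have hlen : ((a :: t).drop (K + 1) ++ (a :: t).take K).length ≤ n := by
            simp only [List.length_append, List.length_drop, List.length_take, List.length_cons] at *
            omega
          rw [ih _ (w ++ [Sum.inr i.1]) hlen]
          congr 1
          simp [PySem.List.len_eq]

-- ===== VERDICT (by name: the statement is the Claim_ definition above) =====
theorem solution_spec : Claim_equal_solution := by
  intro priorities location _
  unfold Spec_solution solution solution_alt
  have := loop_eq location (PySem.List.enumerate priorities 0).length (PySem.List.enumerate priorities 0) [] le_rfl
  simpa [PySem.List.len_eq] using this
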